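-- pv_equiv track=rewrite | github.com/sjsin0905/Baekjoon_Python | Python_Study/프로그래머스_문제풀이/코드처리하기_Lv.0.py | solution
-- ===== SOURCE A (Python) =====
-- def solution(code):
--     mode = 0
--     ret = []
--     count = 0
--     for i in range(len(code)):
--         if mode == 0:
--             if code[i] == "1":
--                 mode = 1
--                 continue
--             if i % 2 == 0:
--                 ret.append(code[i])
--                 count += 1
--         else:
--             if code[i] == "1":
--                 mode = 0
--                 continue
--             if i % 2 == 1:
--                 ret.append(code[i])
--                 count += 1
--     answer = ''.join(map(str, ret))
--     if count == 0:
--         answer = "EMPTY"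
--     return answer
-- ===== SOURCE B (Python) =====
-- def solution(code):
--     # Pass 1: prefix-parity table: par[i] = (# of '1' chars in code[:i]) % 2
--     par = []
--     p = 0
--     for ch in code:
--         par.append(p)
--         if ch == '1':
--             p ^= 1
--     # Pass 2: select characters by consulting the table
--     picked = [ch for i, ch in enumerate(code) if ch != '1' and i % 2 == par[i]]
--     return ''.join(picked) or 'EMPTY'
-- ===== Notes on version B (the rewrite author's own statement) =====
-- stated objective: alternative
-- what changed: Replaces the stateful toggle/continue mode machine by a two-pass table-then-filter: first a prefix-parity table of '1'-counts, then a comprehension selecting code[i] where code[i] != '1' and i % 2 == parity[i].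
import Mathlib
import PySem

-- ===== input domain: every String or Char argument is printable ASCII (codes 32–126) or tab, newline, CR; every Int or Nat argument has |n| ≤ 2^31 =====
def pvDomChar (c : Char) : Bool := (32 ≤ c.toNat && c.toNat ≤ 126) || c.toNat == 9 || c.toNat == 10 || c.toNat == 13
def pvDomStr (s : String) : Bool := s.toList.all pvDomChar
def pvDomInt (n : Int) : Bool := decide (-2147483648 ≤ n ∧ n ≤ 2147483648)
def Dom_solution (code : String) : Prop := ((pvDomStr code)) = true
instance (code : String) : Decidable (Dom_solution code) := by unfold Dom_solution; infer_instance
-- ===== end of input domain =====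

-- B replaces A's toggle/continue mode machine by a prefix-parity table plus a filter pass; alternative decomposition, same cost.

-- ===== PORT A =====
-- one iteration of A's loop body: state (mode, ret, count), element (code[i], i)
def solStep (st : Nat × List Char × Nat) (p : Char × Nat) : Nat × List Char × Nat :=
  let (mode, ret, count) := st
  let (c, i) := p
  if mode == 0 then
    if c == '1' then (1, ret, count)
    else if i % 2 == 0 then (0, ret ++ [c], count + 1) else (0, ret, count)
  else
    if c == '1' then (0, ret, count)
    else if i % 2 == 1 then (1, ret ++ [c], count + 1) else (1, ret, count)

def solution (code : String) : String :=
  let st := (code.toList.zipIdx 0).foldl solStep (0, [], 0)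
  let answer := String.ofList st.2.1
  if st.2.2 == 0 then "EMPTY" else answer

-- ===== PORT B =====
-- parity update: p ^= 1 when ch == '1'
def parStep (p : Nat) (c : Char) : Nat := if c == '1' then 1 - p else p

def pickSel (pc : (Char × Nat) × Nat) : Option Char :=
  if pc.1.1 != '1' && pc.2 % 2 == pc.1.2 then some pc.1.1 else none

def solution_alt (code : String) : String :=
  let cs := code.toList
  let par := cs.scanl parStep 0          -- prefix-parity table (pass 1)
  let picked := ((cs.zip par).zipIdx 0).filterMap pickSel   -- table-consulting filter (pass 2)
  if picked.isEmpty then "EMPTY" else String.ofList picked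

-- ===== PRECONDITION & SPEC =====
def Spec_solution (code : String) (out : String) : Prop := out = solution_alt code
instance (code : String) (out : String) : Decidable (Spec_solution code out) := by unfold Spec_solution; infer_instance

-- ===== CLAIM (what is proved, stated in full; the proofs are below) =====
def Claim_equal_solution : Prop := ∀ (code : String), Dom_solution code → Spec_solution code (solution code)

-- ===== LEMMAS AND PROOFS =====

def pick (cs : List Char) (i m : Nat) : List Char :=
  ((cs.zip (cs.scanl parStep m)).zipIdx i).filterMap pickSel

lemma pick_cons (c : Char) (cs : List Char) (i m : Nat) :
    pick (c :: cs) i m =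
      (if c != '1' && i % 2 == m then [c] else []) ++ pick cs (i + 1) (parStep m c) := by
  simp only [pick, List.scanl_cons, List.zip_cons_cons, List.zipIdx_cons, List.filterMap_cons]
  by_cases h1 : c = '1'
  · simp [pickSel, h1]
  · by_cases h2 : i % 2 = m <;> simp [pickSel, h1, h2]

lemma key (cs : List Char) : ∀ (i m : Nat) (ret : List Char) (cnt : Nat), m = 0 ∨ m = 1 →
    (cs.zipIdx i).foldl solStep (m, ret, cnt) =
      (cs.foldl parStep m, ret ++ pick cs i m, cnt + (pick cs i m).length) := by
  induction cs with
  | nil => intro i m ret cnt _; simp [pick]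
  | cons c cs ih =>
    intro i m ret cnt hm
    rw [List.zipIdx_cons, List.foldl_cons, pick_cons, List.foldl_cons]
    have hstep : solStep (m, ret, cnt) (c, i) =
        (parStep m c,
         ret ++ (if c != '1' && i % 2 == m then [c] else []),
         cnt + (if c != '1' && i % 2 == m then [c] else []).length) := by
      rcases hm with rfl | rfl <;>
        by_cases hc : c = '1' <;>
        · simp only [solStep, parStep, hc]
          rcases Nat.mod_two_eq_zero_or_one i with h2 | h2 <;> simp [h2, hc]
    rw [hstep, ih (i + 1) (parStep m c) _ _ (by rcases hm with rfl | rfl <;> by_cases hc : c = '1' <;> simp [parStep, hc])]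
    simp [List.append_assoc, Nat.add_assoc]

-- ===== VERDICT (by name: the statement is the Claim_ definition above) =====
theorem solution_spec : Claim_equal_solution := by
  intro code _
  show solution code = solution_alt code
  simp only [solution, solution_alt, key code.toList 0 0 [] 0 (Or.inl rfl)]
  have : pick code.toList 0 0 = ((code.toList.zip (code.toList.scanl parStep 0)).zipIdx 0).filterMap pickSel := rfl
  rw [← this]
  rcases h : pick code.toList 0 0 with _ | ⟨c, rest⟩ <;> simp
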